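-- pv_equiv track=rewrite | github.com/gokulp01/RiP-Planner | plan_final.py | even_select
-- ===== SOURCE A (Python) =====
-- def even_select(N, M):
--     if M > N/2:
--         q, r = divmod(N, N-M)
--         indices = [q*i + min(i, r) for i in range(N-M)]
--     else:
--         q, r = divmod(N, M)
--         indices = [q*i + min(i, r) for i in range(M)]
--
--     return indices
-- ===== SOURCE B (Python) =====
-- def even_select(N, M):
--     count = (N - M) if M > N / 2 else M
--     q, r = divmod(N, count)
--     indices = []
--     pos = 0
--     for i in range(count):
--         indices.append(pos)
--         pos += q + 1 if i < r else q
--     return indices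
-- ===== Notes on version B (the rewrite author's own statement) =====
-- stated objective: alternative
-- what changed: Replaces the per-index closed-form comprehension q*i + min(i, r) with a single incremental loop that appends a running position and advances it by q+1 for the first r steps and by q afterwards (the divmod call is kept so the ZeroDivisionError at count==0 is preserved).
import Mathlib
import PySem

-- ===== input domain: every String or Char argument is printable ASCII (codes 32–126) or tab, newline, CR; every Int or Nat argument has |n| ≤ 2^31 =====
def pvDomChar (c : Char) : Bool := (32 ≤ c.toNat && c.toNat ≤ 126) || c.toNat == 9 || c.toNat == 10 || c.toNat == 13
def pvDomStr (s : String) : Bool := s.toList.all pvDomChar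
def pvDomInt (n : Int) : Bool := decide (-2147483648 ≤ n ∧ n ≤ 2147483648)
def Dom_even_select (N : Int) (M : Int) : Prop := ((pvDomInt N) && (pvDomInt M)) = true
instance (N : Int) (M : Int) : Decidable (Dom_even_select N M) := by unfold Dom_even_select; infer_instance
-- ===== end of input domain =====

-- B builds the indices with a running position advanced by q+1 / q instead of A's
-- per-index closed form q*i + min(i, r); same cost, different decomposition.

-- ===== PORT A =====
-- 'M > N/2' on ints within |n| ≤ 2^31 is exactly 2*M > N (N/2 is exact in float here).
def even_select (N : Int) (M : Int) : List Int :=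
  if 2 * M > N then
    match PySem.Int.divmod? N (N - M) with
    | none => []   -- unreachable under Pre_ (ZeroDivisionError)
    | some (q, r) => (PySem.List.pyRange 0 (N - M) 1).map (fun i => q * i + min i r)
  else
    match PySem.Int.divmod? N M with
    | none => []   -- unreachable under Pre_ (ZeroDivisionError)
    | some (q, r) => (PySem.List.pyRange 0 M 1).map (fun i => q * i + min i r)

-- ===== PORT B =====
def even_select_alt (N : Int) (M : Int) : List Int :=
  let count := if 2 * M > N then N - M else M
  match PySem.Int.divmod? N count with
  | none => []   -- unreachable under Pre_ (ZeroDivisionError)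
  | some (q, r) =>
    ((PySem.List.pyRange 0 count 1).foldl
      (fun (s : Int × List Int) i => (s.1 + (if i < r then q + 1 else q), s.2 ++ [s.1]))
      (0, [])).2

-- ===== PRECONDITION & SPEC =====
-- Pre_ excludes exactly the inputs where A raises ZeroDivisionError: divmod's divisor
-- (N-M in the first branch, M in the second) is 0 there. B raises there too.
def Pre_even_select (N : Int) (M : Int) : Prop :=
  (if 2 * M > N then N - M else M) ≠ 0
instance (N : Int) (M : Int) : Decidable (Pre_even_select N M) := by unfold Pre_even_select; infer_instance
def pvWitness_even_select : Int × Int := (10, 3)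

def Spec_even_select (N : Int) (M : Int) (out : List Int) : Prop := out = even_select_alt N M
instance (N : Int) (M : Int) (out : List Int) : Decidable (Spec_even_select N M out) := by unfold Spec_even_select; infer_instance

-- ===== CLAIM (what is proved, stated in full; the proofs are below) =====
def Claim_equal_even_select : Prop := ∀ (N : Int) (M : Int), Dom_even_select N M → Pre_even_select N M → Spec_even_select N M (even_select N M)

-- ===== LEMMAS AND PROOFS =====

-- One step of B's accumulator: pos advances from f i to f (i+1).
theorem pv_step (q r a : Int) :
    q * a + min a r + (if a < r then q + 1 else q) = q * (a + 1) + min (a + 1) r := by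
  have e : q * (a + 1) = q * a + q := by ring
  rw [e]; split_ifs with h <;> omega

-- B's loop over [a, a+n) started at pos = f a appends exactly the map of f.
theorem pv_loop (q r : Int) : ∀ (n : Nat) (a : Int) (acc : List Int),
    ((PySem.List.pyRange a (a + n) 1).foldl
      (fun (s : Int × List Int) i => (s.1 + (if i < r then q + 1 else q), s.2 ++ [s.1]))
      (q * a + min a r, acc)).2
    = acc ++ (PySem.List.pyRange a (a + n) 1).map (fun i => q * i + min i r) := by
  intro n
  induction n with
  | zero => intro a acc; simp [PySem.List.pyRange_one_eq_nil (le_refl a)]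
  | succ k ih =>
    intro a acc
    have hab : a < a + ((k : Int) + 1) := by omega
    have hcast : a + ((k + 1 : Nat) : Int) = a + ((k : Int) + 1) := by push_cast; ring
    rw [hcast, PySem.List.pyRange_one_cons hab]
    simp only [List.foldl_cons, List.map_cons]
    have hnext : a + ((k : Int) + 1) = (a + 1) + (k : Int) := by ring
    rw [pv_step q r a, hnext]
    have := ih (a + 1) (acc ++ [q * a + min a r])
    rw [this]; simp

-- Common core: for divisor c ≠ 0, A's branch body equals B's loop result.
theorem pv_branch (N c : Int) (hc : c ≠ 0) :
    (PySem.List.pyRange 0 c 1).map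
        (fun i => PySem.Int.floordiv N c * i + min i (PySem.Int.mod N c))
    = ((PySem.List.pyRange 0 c 1).foldl
        (fun (s : Int × List Int) i =>
          (s.1 + (if i < PySem.Int.mod N c then PySem.Int.floordiv N c + 1
                  else PySem.Int.floordiv N c), s.2 ++ [s.1]))
        (0, [])).2 := by
  set q := PySem.Int.floordiv N c
  set r := PySem.Int.mod N c with hr
  by_cases h : c ≤ 0
  · simp [PySem.List.pyRange_one_eq_nil h]
  · have hpos : 0 < c := by omega
    have hrnn : 0 ≤ r := by
      rw [hr, PySem.Int.mod_eq_emod_of_pos hpos]; exact Int.emod_nonneg N hc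
    have key := pv_loop q r c.toNat 0 []
    have e0 : q * 0 + min 0 r = 0 := by omega
    have ec : (0 : Int) + (c.toNat : Int) = c := by omega
    rw [e0, ec] at key
    rw [key]; simp

-- ===== VERDICT (by name: the statement is the Claim_ definition above) =====
theorem even_select_spec : Claim_equal_even_select := by
  intro N M _ hPre
  unfold Spec_even_select even_select even_select_alt
  unfold Pre_even_select at hPre
  split_ifs at hPre ⊢ with h
  · have hd : PySem.Int.divmod? N (N - M) =
        some (PySem.Int.floordiv N (N - M), PySem.Int.mod N (N - M)) := by
      simp [PySem.Int.divmod?, PySem.Int.floordiv, PySem.Int.mod, hPre]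
    simp only [hd]
    exact pv_branch N (N - M) hPre
  · have hd : PySem.Int.divmod? N M =
        some (PySem.Int.floordiv N M, PySem.Int.mod N M) := by
      simp [PySem.Int.divmod?, PySem.Int.floordiv, PySem.Int.mod, hPre]
    simp only [hd]
    exact pv_branch N M hPre
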